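-- pv_equiv track=rewrite | github.com/HKU-BAL/Clair3 | preprocess/RealignReads.py | simplfy_read_name
-- ===== SOURCE A (Python) =====
-- CHAR_STR = "0123456789abcdefghijklmnopqrstuvwxyzABCDEFGHIJKLMNOPQRSTUVWXYZ!#$%&()*+./:;<=>?[]^`{|}~"
--
-- L_CHAR_STR = len(CHAR_STR)
--
-- EXP = 5
--
-- T_READ_NAME = L_CHAR_STR ** EXP
--
-- L_CHAR_STR_EXP = [L_CHAR_STR ** i for i in range(EXP - 1, 0, -1)]
--
-- def simplfy_read_name(rs_idx):
--     rs_idx = (rs_idx + 1) % T_READ_NAME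
--     save_read_name = ""
--     div_num = rs_idx
--     for div_exp in L_CHAR_STR_EXP:
--         save_read_name += CHAR_STR[div_num // div_exp]
--         div_num = div_num % div_exp
--     if EXP != 1:
--         save_read_name += CHAR_STR[div_num % L_CHAR_STR]
--     return save_read_name, rs_idx
-- ===== SOURCE B (Python) =====
-- CHAR_STR = "0123456789abcdefghijklmnopqrstuvwxyzABCDEFGHIJKLMNOPQRSTUVWXYZ!#$%&()*+./:;<=>?[]^`{|}~"
--
-- L_CHAR_STR = len(CHAR_STR)
--
-- EXP = 5
--
-- T_READ_NAME = L_CHAR_STR ** EXP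
--
-- def simplfy_read_name(rs_idx):
--     rs_idx = (rs_idx + 1) % T_READ_NAME
--     digits = []
--     n = rs_idx
--     for _ in range(EXP):
--         digits.append(CHAR_STR[n % L_CHAR_STR])
--         n //= L_CHAR_STR
--     return ''.join(reversed(digits)), rs_idx
-- ===== Notes on version B (the rewrite author's own statement) =====
-- stated objective: idiomatic
-- what changed: Replaced the precomputed power table and MSB-first div/mod chain with the standard repeated-divmod loop extracting digits least-significant-first, joined in reverse.
import Mathlib
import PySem

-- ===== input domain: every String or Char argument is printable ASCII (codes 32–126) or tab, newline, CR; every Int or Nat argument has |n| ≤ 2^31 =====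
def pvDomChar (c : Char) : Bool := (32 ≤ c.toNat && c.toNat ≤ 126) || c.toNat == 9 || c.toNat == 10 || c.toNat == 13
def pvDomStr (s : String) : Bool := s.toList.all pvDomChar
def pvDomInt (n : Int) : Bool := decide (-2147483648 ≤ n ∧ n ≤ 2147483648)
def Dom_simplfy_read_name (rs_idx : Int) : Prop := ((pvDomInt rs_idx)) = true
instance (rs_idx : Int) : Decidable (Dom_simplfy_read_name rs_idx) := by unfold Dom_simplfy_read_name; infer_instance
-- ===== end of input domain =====

-- B replaces A's precomputed power table / MSB-first digit extraction with the standard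
-- repeated-divmod digit loop (LSB-first, joined reversed): more idiomatic, same cost.

def pvCharStr : String := "0123456789abcdefghijklmnopqrstuvwxyzABCDEFGHIJKLMNOPQRSTUVWXYZ!#$%&()*+./:;<=>?[]^`{|}~"

def pvLCharStr : Int := PySem.Str.len pvCharStr

def pvExp : Int := 5

def pvTReadName : Int := pvLCharStr ^ pvExp.toNat

-- ===== PORT A =====
def pvLCharStrExp : List Int := (PySem.List.pyRange (pvExp - 1) 0 (-1)).map (fun i => pvLCharStr ^ i.toNat)

-- Python string accumulation is ported as a List Char accumulator, turned into a String at return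
def simplfy_read_name (rs_idx : Int) : String × Int :=
  let rs := PySem.Int.mod (rs_idx + 1) pvTReadName
  let p := pvLCharStrExp.foldl
    (fun (acc : List Char × Int) de =>
      (acc.1 ++ (PySem.Str.pyGet? pvCharStr (PySem.Int.floordiv acc.2 de)).toList,
       PySem.Int.mod acc.2 de))
    ([], rs)
  let s := if pvExp ≠ 1 then
      p.1 ++ (PySem.Str.pyGet? pvCharStr (PySem.Int.mod p.2 pvLCharStr)).toList
    else p.1
  (String.ofList s, rs)

-- ===== PORT B =====
def simplfy_read_name_alt (rs_idx : Int) : String × Int :=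
  let rs := PySem.Int.mod (rs_idx + 1) pvTReadName
  let p := (PySem.List.pyRange 0 pvExp 1).foldl
    (fun (acc : List Char × Int) _ =>
      (acc.1 ++ (PySem.Str.pyGet? pvCharStr (PySem.Int.mod acc.2 pvLCharStr)).toList,
       PySem.Int.floordiv acc.2 pvLCharStr))
    ([], rs)
  (String.ofList p.1.reverse, rs)

-- ===== PRECONDITION & SPEC =====
def Spec_simplfy_read_name (rs_idx : Int) (out : String × Int) : Prop := out = simplfy_read_name_alt rs_idx
instance (rs_idx : Int) (out : String × Int) : Decidable (Spec_simplfy_read_name rs_idx out) := by unfold Spec_simplfy_read_name; infer_instance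

-- ===== CLAIM (what is proved, stated in full; the proofs are below) =====
def Claim_equal_simplfy_read_name : Prop := ∀ (rs_idx : Int), Dom_simplfy_read_name rs_idx → Spec_simplfy_read_name rs_idx (simplfy_read_name rs_idx)

-- ===== LEMMAS AND PROOFS =====

theorem simplfy_read_name_eq_alt (rs_idx : Int) :
    simplfy_read_name rs_idx = simplfy_read_name_alt rs_idx := by
  have hT : pvTReadName = 4984209207 := by decide
  have hE : pvLCharStrExp = [57289761, 658503, 7569, 87] := by decide
  have hR : PySem.List.pyRange 0 pvExp 1 = [0, 1, 2, 3, 4] := by decide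
  have hL : pvLCharStr = 87 := by decide
  unfold simplfy_read_name simplfy_read_name_alt
  set n := PySem.Int.mod (rs_idx + 1) pvTReadName with hn
  have h0 : 0 ≤ n := PySem.Int.mod_nonneg (rs_idx + 1) (by decide : (0:Int) < pvTReadName)
  have h1 : n < 4984209207 := hT ▸ PySem.Int.mod_lt (rs_idx + 1) (by decide : (0:Int) < pvTReadName)
  rw [hE, hR]
  simp only [hL, List.foldl, pvExp]
  simp only [PySem.Int.floordiv_eq_ediv_of_pos (by norm_num : (0:Int) < 87),
    PySem.Int.mod_eq_emod_of_pos (by norm_num : (0:Int) < 87),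
    PySem.Int.floordiv_eq_ediv_of_pos (by norm_num : (0:Int) < 7569),
    PySem.Int.mod_eq_emod_of_pos (by norm_num : (0:Int) < 7569),
    PySem.Int.floordiv_eq_ediv_of_pos (by norm_num : (0:Int) < 658503),
    PySem.Int.mod_eq_emod_of_pos (by norm_num : (0:Int) < 658503),
    PySem.Int.floordiv_eq_ediv_of_pos (by norm_num : (0:Int) < 57289761),
    PySem.Int.mod_eq_emod_of_pos (by norm_num : (0:Int) < 57289761)]
  rw [if_pos (by norm_num : (5:Int) ≠ 1)]
  rw [show n / 57289761 = n / 87 / 87 / 87 / 87 % 87 by omega,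
      show n % 57289761 / 658503 = n / 87 / 87 / 87 % 87 by omega,
      show n % 57289761 % 658503 / 7569 = n / 87 / 87 % 87 by omega,
      show n % 57289761 % 658503 % 7569 / 87 = n / 87 % 87 by omega,
      show n % 57289761 % 658503 % 7569 % 87 % 87 = n % 87 by omega]
  have hrev : ∀ (o : Option Char), o.toList.reverse = o.toList := by intro o; cases o <;> rfl
  simp [List.reverse_append, hrev, List.append_assoc]

-- ===== VERDICT (by name: the statement is the Claim_ definition above) =====
theorem simplfy_read_name_spec : Claim_equal_simplfy_read_name := by
  intro rs_idx _
  unfold Spec_simplfy_read_name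
  exact simplfy_read_name_eq_alt rs_idx
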